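-- pv_equiv track=rewrite | github.com/ZaneBartlett1/NotebooksBudget | backend/checks.py | check_no_duplicates
-- ===== SOURCE A (Python) =====
-- def get_tags_for_budget_plan(budget_plan: dict) -> list:
--     """
--     Returns all tags for a specified budget plan.
--     There's a check that runs which uses this function to make sure there's no duplicates
--     """
--     # Keep track of category to vendor map
--     categories = []
--
--     # Give a flatter mapping of category to tags
--     for category in budget_plan:
--         tags = budget_plan[category]["tags"]
--         if tags:
--             categories.extend(tags)
--
--     return categories
--
-- def get_budget_plan_tag_mapping(budget_plans: dict) -> dict:
--     """
--     Get a dictionary of all tags, regardless of category, for each budget plan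
--
--     Shaped like:
--     {'plan' : [tag_1, tag_2, ..., tag_n]}
--     This is used in a check to make sure there's no duplicates
--     """
--     plan_to_tag_map = {}
--     for budget_plan in budget_plans:
--         budget_plan_dict = budget_plans[budget_plan]
--
--         # e.g. plan_to_tag_map['50/30/20_rule'] = {fifty: {...}, thirty: {...}
--         tags_for_budget_plan = get_tags_for_budget_plan(budget_plan_dict)
--         plan_to_tag_map[budget_plan] = tags_for_budget_plan
--
--     return plan_to_tag_map
--
-- def check_no_duplicates(budget_plans: dict):
--     """Used to check that there is no duplicate tags under any category for the budget plan"""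
--     # Get mapping of budget plans to all tags, regardless of category
--     plan_to_tags = get_budget_plan_tag_mapping(budget_plans)
--
--     failures = []
--     pass_check = True
--
--     for plan in plan_to_tags:
--         # Get the tag list for this plan
--         tag_list = plan_to_tags[plan]
--         if len(tag_list) != len(set(tag_list)):
--             failures.append(plan)
--             pass_check = False
--
--     return pass_check, failures
-- ===== SOURCE B (Python) =====
-- def check_no_duplicates(budget_plans: dict):
--     """Used to check that there is no duplicate tags under any category for the budget plan"""
--     pass_check = True
--     failures = []
--     for plan, categories in budget_plans.items():
--         seen = set()
--         dup = False
--         for category in categories: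
--             for tag in categories[category]["tags"]:
--                 if tag in seen:
--                     dup = True
--                     break
--                 seen.add(tag)
--             if dup:
--                 break
--         if dup:
--             pass_check = False
--             failures.append(plan)
--     return pass_check, failures
-- ===== Notes on version B (the rewrite author's own statement) =====
-- stated objective: simpler
-- what changed: Single pass with a per-plan 'seen' set that detects a repeated tag incrementally and breaks out of the plan early, instead of building a plan-to-all-tags mapping via two helper functions and then comparing len(list) with len(set(list)).
-- outside the precondition, e.g. on check_no_duplicates({'p': {'c': {}}}): A raises KeyError, B raises KeyError
import Mathlib
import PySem

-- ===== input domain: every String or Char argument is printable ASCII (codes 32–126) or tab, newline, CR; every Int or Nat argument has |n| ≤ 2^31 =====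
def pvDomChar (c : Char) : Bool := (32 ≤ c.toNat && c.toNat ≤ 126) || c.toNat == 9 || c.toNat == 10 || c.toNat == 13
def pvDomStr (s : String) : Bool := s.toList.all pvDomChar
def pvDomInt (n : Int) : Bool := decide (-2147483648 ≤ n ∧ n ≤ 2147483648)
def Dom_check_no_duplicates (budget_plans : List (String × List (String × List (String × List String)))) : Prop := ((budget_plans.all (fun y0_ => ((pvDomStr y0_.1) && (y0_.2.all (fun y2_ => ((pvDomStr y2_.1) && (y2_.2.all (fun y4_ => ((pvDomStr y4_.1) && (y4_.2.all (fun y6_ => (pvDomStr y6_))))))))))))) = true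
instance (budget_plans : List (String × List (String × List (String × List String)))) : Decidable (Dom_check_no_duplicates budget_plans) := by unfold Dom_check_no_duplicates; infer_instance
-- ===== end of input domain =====

-- B replaces A's build-a-full-tag-list-then-compare-lengths detection (two helper passes and an
-- intermediate plan→tags dict) by one pass with a per-plan 'seen' set and an early break.

-- ===== PORT A =====
-- get_tags_for_budget_plan: flatten budget_plan[category]["tags"] over the categories, skipping falsy tag lists
def pvGetTagsForBudgetPlan (budget_plan : List (String × List (String × List String))) : List String :=
  budget_plan.foldl (fun categories cat =>
    let tags := (PySem.Dict.mk cat.2).getD "tags" []   -- budget_plan[category]["tags"]; KeyError (none) excluded by Pre_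
    if tags.isEmpty then categories else categories ++ tags) []

-- get_budget_plan_tag_mapping
def pvGetBudgetPlanTagMapping (budget_plans : List (String × List (String × List (String × List String)))) : PySem.Dict String (List String) :=
  budget_plans.foldl (fun m p => m.insert p.1 (pvGetTagsForBudgetPlan p.2)) PySem.Dict.empty

def check_no_duplicates (budget_plans : List (String × List (String × List (String × List String)))) : Bool × List String :=
  let plan_to_tags := pvGetBudgetPlanTagMapping budget_plans
  plan_to_tags.keys.foldl (fun (st : Bool × List String) plan =>
      let tag_list := plan_to_tags.getD plan []
      if tag_list.length ≠ (PySem.Set.ofList tag_list).length then (false, st.2 ++ [plan]) else st)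
    (true, [])

-- ===== PORT B =====
-- inner tag loop: some seen' = no duplicate yet (updated seen), none = duplicate found (break)
def pvScanTags : List String → PySem.Set String → Option (PySem.Set String)
  | [], seen => some seen
  | t :: ts, seen => if PySem.Set.contains seen t then none else pvScanTags ts (PySem.Set.add seen t)

-- category loop of one plan, with early break once a duplicate is seen
def pvPlanHasDup : List (String × List (String × List String)) → PySem.Set String → Bool
  | [], _ => false
  | cat :: rest, seen =>
      match pvScanTags ((PySem.Dict.mk cat.2).getD "tags" []) seen with
      | none => true
      | some seen' => pvPlanHasDup rest seen'

def check_no_duplicates_alt (budget_plans : List (String × List (String × List (String × List String)))) : Bool × List String :=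
  budget_plans.foldl (fun (st : Bool × List String) p =>
    if pvPlanHasDup p.2 PySem.Set.empty then (false, st.2 ++ [p.1]) else st) (true, [])

-- ===== PRECONDITION & SPEC =====
-- Pre_ excludes (i) association lists with duplicate keys at any dict level — a Python dict cannot
-- contain them, so such lists do not represent the Python input faithfully — and (ii) category dicts
-- without a "tags" key, on which A raises KeyError.
def Pre_check_no_duplicates (budget_plans : List (String × List (String × List (String × List String)))) : Prop :=
  (budget_plans.map Prod.fst).Nodup ∧
  ∀ p ∈ budget_plans, (p.2.map Prod.fst).Nodup ∧
    ∀ c ∈ p.2, (c.2.map Prod.fst).Nodup ∧ "tags" ∈ c.2.map Prod.fst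
instance (budget_plans : List (String × List (String × List (String × List String)))) : Decidable (Pre_check_no_duplicates budget_plans) := by unfold Pre_check_no_duplicates; infer_instance

def pvWitness_check_no_duplicates : (List (String × List (String × List (String × List String)))) :=
  [("p", [("c", [("tags", ["a", "b"])])]), ("q", [("d", [("tags", ["a", "a"])])])]

def Spec_check_no_duplicates (budget_plans : List (String × List (String × List (String × List String)))) (out : Bool × List String) : Prop := out = check_no_duplicates_alt budget_plans
instance (budget_plans : List (String × List (String × List (String × List String)))) (out : Bool × List String) : Decidable (Spec_check_no_duplicates budget_plans out) := by unfold Spec_check_no_duplicates; infer_instance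

-- ===== CLAIM (what is proved, stated in full; the proofs are below) =====
def Claim_equal_check_no_duplicates : Prop := ∀ (budget_plans : List (String × List (String × List (String × List String)))), Dom_check_no_duplicates budget_plans → Pre_check_no_duplicates budget_plans → Spec_check_no_duplicates budget_plans (check_no_duplicates budget_plans)

-- ===== LEMMAS AND PROOFS =====

-- the flat tag list of one plan
def pvFlatTags (budget_plan : List (String × List (String × List String))) : List String :=
  (budget_plan.map (fun c => (PySem.Dict.mk c.2).getD "tags" [])).flatten

theorem pvGetTags_acc (bp : List (String × List (String × List String))) :
    ∀ acc, bp.foldl (fun categories cat =>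
      let tags := (PySem.Dict.mk cat.2).getD "tags" []
      if tags.isEmpty then categories else categories ++ tags) acc = acc ++ pvFlatTags bp := by
  induction bp with
  | nil => intro acc; simp [pvFlatTags]
  | cons c rest ih =>
      intro acc
      simp only [List.foldl_cons, pvFlatTags, List.map_cons, List.flatten_cons]
      rw [ih]
      by_cases h : ((PySem.Dict.mk c.2).getD "tags" []).isEmpty
      · simp only [h, if_true]
        rw [List.isEmpty_iff] at h
        simp [h, pvFlatTags]
      · simp only [h]
        simp [pvFlatTags, List.append_assoc]

theorem pvGetTags_eq (bp : List (String × List (String × List String))) :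
    pvGetTagsForBudgetPlan bp = pvFlatTags bp := by
  unfold pvGetTagsForBudgetPlan
  exact (pvGetTags_acc bp []).trans (List.nil_append _)

theorem pvLenAdd (s : PySem.Set String) (x : String) :
    (PySem.Set.add s x).length = if x ∈ s then s.length else s.length + 1 := by
  simp [PySem.Set.add]; split <;> simp

theorem pvLenUpdateLe (l : List String) : ∀ s : PySem.Set String,
    (PySem.Set.update s l).length ≤ s.length + l.length := by
  induction l with
  | nil => intro s; simp [PySem.Set.update]
  | cons t ts ih =>
      intro s
      rw [PySem.Set.update_cons]
      have h := ih (PySem.Set.add s t)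
      have ha : (PySem.Set.add s t).length ≤ s.length + 1 := by
        rw [pvLenAdd]; split <;> omega
      simp only [List.length_cons]; omega

theorem pvScanTags_eq (l : List String) : ∀ s : PySem.Set String,
    pvScanTags l s = if (PySem.Set.update s l).length = s.length + l.length
      then some (PySem.Set.update s l) else none := by
  induction l with
  | nil => intro s; simp [pvScanTags, PySem.Set.update]
  | cons t ts ih =>
      intro s
      rw [PySem.Set.update_cons]
      by_cases hm : t ∈ s
      · have hc : PySem.Set.contains s t = true := (PySem.Set.contains_iff s t).mpr hm
        have hadd : PySem.Set.add s t = s := by simp [PySem.Set.add, hm]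
        have hle := pvLenUpdateLe ts s
        simp only [pvScanTags, hc, if_true, hadd]
        rw [if_neg (by simp only [List.length_cons]; omega)]
      · have hc : PySem.Set.contains s t = false := by
          by_contra hx
          exact hm ((PySem.Set.contains_iff s t).mp (by revert hx; cases PySem.Set.contains s t <;> simp))
        have hadd : (PySem.Set.add s t).length = s.length + 1 := by
          rw [pvLenAdd, if_neg hm]
        simp only [pvScanTags, hc, if_false, Bool.false_eq_true]
        rw [ih (PySem.Set.add s t), hadd]
        have heq : s.length + 1 + ts.length = s.length + (t :: ts).length := by
          simp only [List.length_cons]; omega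
        rw [heq]

theorem pvPlanHasDup_eq (bp : List (String × List (String × List String))) :
    ∀ s : PySem.Set String,
    pvPlanHasDup bp s = decide ((PySem.Set.update s (pvFlatTags bp)).length ≠ s.length + (pvFlatTags bp).length) := by
  induction bp with
  | nil => intro s; simp [pvPlanHasDup, pvFlatTags, PySem.Set.update]
  | cons c rest ih =>
      intro s
      have hflat : pvFlatTags (c :: rest)
          = (PySem.Dict.mk c.2).getD "tags" [] ++ pvFlatTags rest := by
        simp [pvFlatTags]
      set tg := (PySem.Dict.mk c.2).getD "tags" [] with htg
      rw [show pvPlanHasDup (c :: rest) s = (match pvScanTags tg s with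
            | none => true | some seen' => pvPlanHasDup rest seen') from rfl]
      rw [pvScanTags_eq tg s]
      by_cases h : (PySem.Set.update s tg).length = s.length + tg.length
      · rw [if_pos h]
        simp only []
        rw [ih (PySem.Set.update s tg)]
        rw [hflat, PySem.Set.update_append]
        rw [decide_eq_decide]
        rw [h]
        simp only [List.length_append]
        omega
      · rw [if_neg h]
        simp only []
        have hle1 := pvLenUpdateLe tg s
        have hle2 := pvLenUpdateLe (pvFlatTags rest) (PySem.Set.update s tg)
        rw [hflat, PySem.Set.update_append]
        symm
        rw [decide_eq_true_iff]
        simp only [List.length_append]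
        omega

-- A's per-plan duplicate test agrees with B's incremental scan
theorem pvCond_eq (bp : List (String × List (String × List String))) :
    ((pvGetTagsForBudgetPlan bp).length ≠ (PySem.Set.ofList (pvGetTagsForBudgetPlan bp)).length)
      ↔ pvPlanHasDup bp PySem.Set.empty = true := by
  rw [pvGetTags_eq, pvPlanHasDup_eq bp PySem.Set.empty]
  rw [show PySem.Set.update PySem.Set.empty (pvFlatTags bp) = PySem.Set.ofList (pvFlatTags bp) from
    PySem.Set.update_nil_left (pvFlatTags bp)]
  simp [PySem.Set.empty]
  omega

theorem pvItems_mapping (plans : List (String × List (String × List (String × List String))))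
    (hnd : (plans.map Prod.fst).Nodup) :
    (pvGetBudgetPlanTagMapping plans).items = plans.map (fun p => (p.1, pvGetTagsForBudgetPlan p.2)) := by
  unfold pvGetBudgetPlanTagMapping
  have := PySem.Dict.items_foldl_insert_fresh plans (fun p => p.1) (fun p => pvGetTagsForBudgetPlan p.2)
    PySem.Dict.empty (by intro a _; simp [PySem.Dict.contains_empty]) hnd
  simpa [PySem.Dict.empty] using this

theorem pvGetD_mapping (plans : List (String × List (String × List (String × List String))))
    (hnd : (plans.map Prod.fst).Nodup) (p : String × List (String × List (String × List String)))
    (hp : p ∈ plans) :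
    (pvGetBudgetPlanTagMapping plans).getD p.1 [] = pvGetTagsForBudgetPlan p.2 := by
  apply PySem.Dict.getD_of_mem_items
  · rw [pvItems_mapping plans hnd]
    exact List.mem_map_of_mem hp
  · show ((pvGetBudgetPlanTagMapping plans).items.map Prod.fst).Nodup
    rw [pvItems_mapping plans hnd, List.map_map]
    simpa using hnd

theorem pvKeys_mapping (plans : List (String × List (String × List (String × List String))))
    (hnd : (plans.map Prod.fst).Nodup) :
    (pvGetBudgetPlanTagMapping plans).keys = plans.map Prod.fst := by
  show (pvGetBudgetPlanTagMapping plans).items.map Prod.fst = _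
  rw [pvItems_mapping plans hnd, List.map_map]
  rfl

-- ===== VERDICT (by name: the statement is the Claim_ definition above) =====
theorem check_no_duplicates_spec : Claim_equal_check_no_duplicates := by
  intro plans _ hpre
  obtain ⟨hnd, -⟩ := hpre
  unfold Spec_check_no_duplicates check_no_duplicates_alt
  rw [show check_no_duplicates plans = (pvGetBudgetPlanTagMapping plans).keys.foldl
      (fun (st : Bool × List String) plan =>
        if ((pvGetBudgetPlanTagMapping plans).getD plan []).length ≠
            (PySem.Set.ofList ((pvGetBudgetPlanTagMapping plans).getD plan [])).length
        then (false, st.2 ++ [plan]) else st) (true, []) from rfl]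
  rw [pvKeys_mapping plans hnd, List.foldl_map]
  apply PySem.List.foldl_congr_mem
  intro st p hp
  rw [pvGetD_mapping plans hnd p hp]
  by_cases h : (pvGetTagsForBudgetPlan p.2).length ≠ (PySem.Set.ofList (pvGetTagsForBudgetPlan p.2)).length
  · rw [if_pos h, if_pos ((pvCond_eq p.2).mp h)]
  · rw [if_neg h, if_neg (by rw [← pvCond_eq p.2] at *; exact h)]
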